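-- pv_equiv track=rewrite | github.com/marcemq/algorithms | programming/equalStacks.py | getEqualHeight
-- ===== SOURCE A (Python) =====
-- from operator import itemgetter
--
-- def checkStackHeight(s1, s2, s3):
--     n1, n2, n3 = len(s1), len(s2), len(s3)
--     if n1 == 0 or n2 == 0 or n3 == 0:
--         return True, 0
--     elif s1[n1-1][1] == s2[n2-1][1] and s2[n2-1][1] == s3[n3-1][1]:
--         return True, s1[n1-1][1]
--     else:
--         return False, -1
--
-- def removeTopHigherStacks(stackMinTop, s1, s2, s3):
--     if s1[len(s1)-1][1] > stackMinTop[1]: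
--         s1.pop()
--     if s2[len(s2)-1][1] > stackMinTop[1]:
--         s2.pop()
--     if s3[len(s3)-1][1] > stackMinTop[1]:
--         s3.pop()
--
-- def convertToStack(si, hi, n):
--     height_i = 0
--     hi = list(reversed(hi))
--     for i in range(n):
--         height_i += hi[i]
--         si.append((hi[i], height_i))
--
-- def getEqualHeight(n, h1, h2, h3):
--     s1, s2, s3 = list(), list(), list()
--     convertToStack(s1, h1, n[0])
--     convertToStack(s2, h2, n[1])
--     convertToStack(s3, h3, n[2])
--
--     while True:
--         n1, n2, n3 = len(s1), len(s2), len(s3)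
--         sameHeightFlag, height = checkStackHeight(s1, s2, s3)
--         if sameHeightFlag:
--             return height
--         else:
--             stackMinTop = min(s1[n1-1],s2[n2-1],s3[n3-1],key=itemgetter(1))
--             removeTopHigherStacks(stackMinTop, s1, s2, s3)
-- ===== SOURCE B (Python) =====
-- def getEqualHeight(n, h1, h2, h3):
--     def sums(hi, k):
--         r = list(reversed(hi))
--         out = [0]
--         t = 0
--         for i in range(k):
--             t += r[i]
--             out.append(t)
--         return out
--     a, b, c = sums(h1, n[0]), sums(h2, n[1]), sums(h3, n[2])
--     i, j, k = len(a) - 1, len(b) - 1, len(c) - 1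
--     while True:
--         if i == 0 or j == 0 or k == 0:
--             return 0
--         x, y, z = a[i], b[j], c[k]
--         if x == y == z:
--             return x
--         m = min(x, y, z)
--         if x > m:
--             i -= 1
--         if y > m:
--             j -= 1
--         if z > m:
--             k -= 1
-- ===== Notes on version B (the rewrite author's own statement) =====
-- stated objective: simpler
-- what changed: B replaces A's mutable tuple-stacks (built by convertToStack and shrunk in place by pop() via two helper functions and min(...,key=itemgetter(1))) with three immutable prefix-sum arrays walked by three integer indices in one plain loop.
import Mathlib
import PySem

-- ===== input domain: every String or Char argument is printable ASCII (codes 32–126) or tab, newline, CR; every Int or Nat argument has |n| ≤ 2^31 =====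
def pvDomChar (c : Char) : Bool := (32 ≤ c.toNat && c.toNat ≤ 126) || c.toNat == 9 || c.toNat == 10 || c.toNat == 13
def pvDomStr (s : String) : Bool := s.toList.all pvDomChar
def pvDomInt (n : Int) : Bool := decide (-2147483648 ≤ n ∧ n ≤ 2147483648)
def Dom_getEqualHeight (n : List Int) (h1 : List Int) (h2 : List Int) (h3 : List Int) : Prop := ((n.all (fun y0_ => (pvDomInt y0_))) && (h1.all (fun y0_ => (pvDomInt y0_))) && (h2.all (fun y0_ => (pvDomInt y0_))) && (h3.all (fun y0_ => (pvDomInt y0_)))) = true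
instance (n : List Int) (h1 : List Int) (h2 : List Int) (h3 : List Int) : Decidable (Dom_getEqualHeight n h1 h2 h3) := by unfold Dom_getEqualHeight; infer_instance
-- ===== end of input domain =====

-- B drops A's mutable tuple-stacks and helper functions for three prefix-sum arrays
-- walked by three indices in one plain loop; same cost, simpler code ("simpler").

-- B drops A's mutable tuple-stacks and helper functions for three prefix-sum arrays
-- walked by three indices in one plain loop; same cost, simpler code ("simpler").
-- A mutates only its local stacks, so return-value equivalence is full equivalence.

-- ===== PORT A =====

-- convertToStack(si, hi, n): builds the stack of (element, running height) pairs.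
-- hi[i] is in range whenever Python does not raise (Pre_); the .getD default is
-- never the value used inside Pre_.
def convertToStack (hi : List Int) (n : Int) : List (Int × Int) :=
  let hr := hi.reverse
  ((PySem.List.pyRange 0 n 1).foldl
    (fun (st : List (Int × Int) × Int) i =>
      let x := (PySem.List.pyGet? hr i).getD 0
      (st.1 ++ [(x, st.2 + x)], st.2 + x))
    ([], 0)).1

-- min(t1, t2, t3, key=itemgetter(1)): Python keeps the first strictly smaller key.
def pickMin (t1 t2 t3 : Int × Int) : Int × Int :=
  let b1 := if t2.2 < t1.2 then t2 else t1
  if t3.2 < b1.2 then t3 else b1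

-- the while-loop of getEqualHeight (checkStackHeight / removeTopHigherStacks inlined
-- step for step: empty test, top comparison via s[len-1][1], conditional pops).
-- fuel is only a totality guard: every call below supplies more fuel than the loop
-- can iterate (each iteration pops at least one element), so the 0 branch is dead.
def aLoop (fuel : Nat) (s1 s2 s3 : List (Int × Int)) : Int :=
  match fuel with
  | 0 => 0
  | fuel + 1 =>
    if s1 = [] ∨ s2 = [] ∨ s3 = [] then 0
    else
      let t1 := ((PySem.List.pyGet? s1 ((s1.length : Int) - 1)).getD (0, 0))
      let t2 := ((PySem.List.pyGet? s2 ((s2.length : Int) - 1)).getD (0, 0))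
      let t3 := ((PySem.List.pyGet? s3 ((s3.length : Int) - 1)).getD (0, 0))
      if t1.2 = t2.2 ∧ t2.2 = t3.2 then t1.2
      else
        let m := (pickMin t1 t2 t3).2
        aLoop fuel (if t1.2 > m then s1.dropLast else s1)
              (if t2.2 > m then s2.dropLast else s2)
              (if t3.2 > m then s3.dropLast else s3)

def getEqualHeight (n : List Int) (h1 : List Int) (h2 : List Int) (h3 : List Int) : Int :=
  let s1 := convertToStack h1 ((PySem.List.pyGet? n 0).getD 0)
  let s2 := convertToStack h2 ((PySem.List.pyGet? n 1).getD 0)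
  let s3 := convertToStack h3 ((PySem.List.pyGet? n 2).getD 0)
  aLoop (s1.length + s2.length + s3.length + 1) s1 s2 s3

-- ===== PORT B =====

-- sums(hi, k): [0] followed by the running prefix sums of reversed(hi)[:k]
def bSums (hi : List Int) (k : Int) : List Int :=
  let r := hi.reverse
  ((PySem.List.pyRange 0 k 1).foldl
    (fun (st : List Int × Int) i =>
      let x := (PySem.List.pyGet? r i).getD 0
      (st.1 ++ [st.2 + x], st.2 + x))
    ([0], 0)).1

-- B's while loop over the three arrays and indices (indices stay ≥ 0: each is
-- decremented only after the i/j/k = 0 exit, so Nat subtraction is exact here).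
-- fuel is only a totality guard; the call below supplies more than can be used.
def bLoop (fuel : Nat) (a b c : List Int) (i j k : Nat) : Int :=
  match fuel with
  | 0 => 0
  | fuel + 1 =>
    if i = 0 ∨ j = 0 ∨ k = 0 then 0
    else
      let x := a.getD i 0
      let y := b.getD j 0
      let z := c.getD k 0
      if x = y ∧ y = z then x
      else
        let m := min x (min y z)
        bLoop fuel a b c (if x > m then i - 1 else i) (if y > m then j - 1 else j)
          (if z > m then k - 1 else k)

def getEqualHeight_alt (n : List Int) (h1 : List Int) (h2 : List Int) (h3 : List Int) : Int :=
  let a := bSums h1 ((PySem.List.pyGet? n 0).getD 0)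
  let b := bSums h2 ((PySem.List.pyGet? n 1).getD 0)
  let c := bSums h3 ((PySem.List.pyGet? n 2).getD 0)
  bLoop ((a.length - 1) + (b.length - 1) + (c.length - 1) + 1) a b c
    (a.length - 1) (b.length - 1) (c.length - 1)

-- ===== PRECONDITION & SPEC =====
-- Pre_ excludes exactly the inputs where Python A raises IndexError: fewer than
-- three stack sizes, or a stack size n[i] exceeding len(hi).
def Pre_getEqualHeight (n : List Int) (h1 : List Int) (h2 : List Int) (h3 : List Int) : Prop :=
  3 ≤ n.length ∧ n.getD 0 0 ≤ (h1.length : Int) ∧ n.getD 1 0 ≤ (h2.length : Int) ∧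
    n.getD 2 0 ≤ (h3.length : Int)
instance (n : List Int) (h1 : List Int) (h2 : List Int) (h3 : List Int) : Decidable (Pre_getEqualHeight n h1 h2 h3) := by unfold Pre_getEqualHeight; infer_instance

def pvWitness_getEqualHeight : List Int × List Int × List Int × List Int :=
  ([2, 3, 3], [3, 2, 1, 1, 1], [4, 3, 2], [1, 1, 4, 1])

def Spec_getEqualHeight (n : List Int) (h1 : List Int) (h2 : List Int) (h3 : List Int) (out : Int) : Prop := out = getEqualHeight_alt n h1 h2 h3
instance (n : List Int) (h1 : List Int) (h2 : List Int) (h3 : List Int) (out : Int) : Decidable (Spec_getEqualHeight n h1 h2 h3 out) := by unfold Spec_getEqualHeight; infer_instance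

-- ===== CLAIM (what is proved, stated in full; the proofs are below) =====
def Claim_equal_getEqualHeight : Prop := ∀ (n : List Int) (h1 : List Int) (h2 : List Int) (h3 : List Int), Dom_getEqualHeight n h1 h2 h3 → Pre_getEqualHeight n h1 h2 h3 → Spec_getEqualHeight n h1 h2 h3 (getEqualHeight n h1 h2 h3)

-- ===== LEMMAS AND PROOFS =====

theorem pickMin_snd (t1 t2 t3 : Int × Int) :
    (pickMin t1 t2 t3).2 = min t1.2 (min t2.2 t3.2) := by
  unfold pickMin; dsimp only; split_ifs <;> omega

theorem fold_rel (l : List Int) (r : List Int) (s : List (Int × Int)) (t : Int) :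
    (l.foldl
      (fun (st : List Int × Int) i =>
        let x := (PySem.List.pyGet? r i).getD 0
        (st.1 ++ [st.2 + x], st.2 + x)) (0 :: s.map Prod.snd, t)).1
    = 0 :: ((l.foldl
      (fun (st : List (Int × Int) × Int) i =>
        let x := (PySem.List.pyGet? r i).getD 0
        (st.1 ++ [(x, st.2 + x)], st.2 + x)) (s, t)).1).map Prod.snd := by
  induction l generalizing s t with
  | nil => simp
  | cons a l ih =>
    simp only [List.foldl_cons]
    have h2 : (0 :: s.map Prod.snd) ++ [t + (PySem.List.pyGet? r a).getD 0]
        = 0 :: (s ++ [((PySem.List.pyGet? r a).getD 0, t + (PySem.List.pyGet? r a).getD 0)]).map Prod.snd := by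
      simp
    rw [h2]
    exact ih (s ++ [((PySem.List.pyGet? r a).getD 0, t + (PySem.List.pyGet? r a).getD 0)])
      (t + (PySem.List.pyGet? r a).getD 0)

theorem bSums_eq_convert (hi : List Int) (k : Int) :
    bSums hi k = 0 :: (convertToStack hi k).map Prod.snd := by
  unfold bSums convertToStack
  exact fold_rel (PySem.List.pyRange 0 k 1) hi.reverse [] 0

theorem top_take (S : List (Int × Int)) (i : Nat) (h1 : 1 ≤ i) (h2 : i ≤ S.length) :
    (PySem.List.pyGet? (S.take i) (((S.take i).length : Int) - 1)).getD (0, 0)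
      = S[i - 1]'(by omega) := by
  have hlen : (S.take i).length = i := by simp; omega
  rw [hlen]
  have hc : ((i : Nat) : Int) - 1 = ((i - 1 : Nat) : Int) := by omega
  rw [hc, PySem.List.pyGet?_natCast]
  rw [List.getElem?_take_of_lt (by omega), List.getElem?_eq_getElem (by omega)]
  rfl

theorem getD_cons_map (S : List (Int × Int)) (i : Nat) (h1 : 1 ≤ i) (h2 : i ≤ S.length) :
    (0 :: S.map Prod.snd).getD i 0 = (S[i - 1]'(by omega)).2 := by
  obtain ⟨i, rfl⟩ := Nat.exists_eq_succ_of_ne_zero (by omega : i ≠ 0)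
  simp only [List.getD_cons_succ, Nat.succ_sub_one]
  rw [List.getD_eq_getElem?_getD, List.getElem?_map,
    List.getElem?_eq_getElem (by simpa using by omega : i < S.length)]
  rfl

theorem dropLast_take (S : List (Int × Int)) (i : Nat) (h2 : i ≤ S.length) :
    (S.take i).dropLast = S.take (i - 1) := by
  rw [List.dropLast_eq_take, List.take_take, List.length_take]
  congr 1
  omega

theorem aLoop_unfold (fuel : Nat) (s1 s2 s3 : List (Int × Int)) :
    aLoop (fuel + 1) s1 s2 s3 =
      if s1 = [] ∨ s2 = [] ∨ s3 = [] then 0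
      else if ((PySem.List.pyGet? s1 ((s1.length : Int) - 1)).getD (0, 0)).2 = ((PySem.List.pyGet? s2 ((s2.length : Int) - 1)).getD (0, 0)).2 ∧ ((PySem.List.pyGet? s2 ((s2.length : Int) - 1)).getD (0, 0)).2 = ((PySem.List.pyGet? s3 ((s3.length : Int) - 1)).getD (0, 0)).2 then ((PySem.List.pyGet? s1 ((s1.length : Int) - 1)).getD (0, 0)).2
      else
        aLoop fuel (if ((PySem.List.pyGet? s1 ((s1.length : Int) - 1)).getD (0, 0)).2 > (pickMin ((PySem.List.pyGet? s1 ((s1.length : Int) - 1)).getD (0, 0)) ((PySem.List.pyGet? s2 ((s2.length : Int) - 1)).getD (0, 0)) ((PySem.List.pyGet? s3 ((s3.length : Int) - 1)).getD (0, 0))).2 then s1.dropLast else s1)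
          (if ((PySem.List.pyGet? s2 ((s2.length : Int) - 1)).getD (0, 0)).2 > (pickMin ((PySem.List.pyGet? s1 ((s1.length : Int) - 1)).getD (0, 0)) ((PySem.List.pyGet? s2 ((s2.length : Int) - 1)).getD (0, 0)) ((PySem.List.pyGet? s3 ((s3.length : Int) - 1)).getD (0, 0))).2 then s2.dropLast else s2)
          (if ((PySem.List.pyGet? s3 ((s3.length : Int) - 1)).getD (0, 0)).2 > (pickMin ((PySem.List.pyGet? s1 ((s1.length : Int) - 1)).getD (0, 0)) ((PySem.List.pyGet? s2 ((s2.length : Int) - 1)).getD (0, 0)) ((PySem.List.pyGet? s3 ((s3.length : Int) - 1)).getD (0, 0))).2 then s3.dropLast else s3) := rfl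

theorem bLoop_unfold (fuel : Nat) (a b c : List Int) (i j k : Nat) :
    bLoop (fuel + 1) a b c i j k =
      if i = 0 ∨ j = 0 ∨ k = 0 then 0
      else if a.getD i 0 = b.getD j 0 ∧ b.getD j 0 = c.getD k 0 then a.getD i 0
      else
        bLoop fuel a b c
          (if a.getD i 0 > min (a.getD i 0) (min (b.getD j 0) (c.getD k 0)) then i - 1 else i)
          (if b.getD j 0 > min (a.getD i 0) (min (b.getD j 0) (c.getD k 0)) then j - 1 else j)
          (if c.getD k 0 > min (a.getD i 0) (min (b.getD j 0) (c.getD k 0)) then k - 1 else k) := rfl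

theorem loop_eq : ∀ (fuel : Nat) (S1 S2 S3 : List (Int × Int)) (i j k : Nat),
    i ≤ S1.length → j ≤ S2.length → k ≤ S3.length →
    aLoop fuel (S1.take i) (S2.take j) (S3.take k)
      = bLoop fuel (0 :: S1.map Prod.snd) (0 :: S2.map Prod.snd) (0 :: S3.map Prod.snd) i j k := by
  intro fuel
  induction fuel with
  | zero => intros; rfl
  | succ fuel ih =>
  intro S1 S2 S3 i j k hi hj hk
  rw [aLoop_unfold, bLoop_unfold]
  by_cases hz : i = 0 ∨ j = 0 ∨ k = 0
  · rw [if_pos, if_pos hz]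
    rcases hz with h | h | h <;> simp [h]
  · simp only [not_or] at hz
    obtain ⟨hz1, hz2, hz3⟩ := hz
    rw [if_neg, if_neg (by omega : ¬(i = 0 ∨ j = 0 ∨ k = 0))]
    · rw [top_take S1 i (by omega) hi, top_take S2 j (by omega) hj, top_take S3 k (by omega) hk,
        getD_cons_map S1 i (by omega) hi, getD_cons_map S2 j (by omega) hj,
        getD_cons_map S3 k (by omega) hk, pickMin_snd,
        dropLast_take S1 i hi, dropLast_take S2 j hj, dropLast_take S3 k hk]
      set x := (S1[i - 1]'(by omega)).2 with hx
      set y := (S2[j - 1]'(by omega)).2 with hy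
      set z := (S3[k - 1]'(by omega)).2 with hzz
      by_cases heq : x = y ∧ y = z
      · rw [if_pos heq, if_pos heq]
      · rw [if_neg heq, if_neg heq,
          ← apply_ite (fun m => List.take m S1), ← apply_ite (fun m => List.take m S2),
          ← apply_ite (fun m => List.take m S3)]
        exact ih S1 S2 S3 _ _ _ (by split_ifs <;> omega) (by split_ifs <;> omega)
          (by split_ifs <;> omega)
    · have len1 : (S1.take i).length = i := by rw [List.length_take]; omega
      have len2 : (S2.take j).length = j := by rw [List.length_take]; omega
      have len3 : (S3.take k).length = k := by rw [List.length_take]; omega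
      rintro (h | h | h)
      · rw [h] at len1; simp at len1; omega
      · rw [h] at len2; simp at len2; omega
      · rw [h] at len3; simp at len3; omega

-- ===== VERDICT (by name: the statement is the Claim_ definition above) =====
theorem getEqualHeight_spec : Claim_equal_getEqualHeight := by
  intro n h1 h2 h3 _ _
  unfold Spec_getEqualHeight getEqualHeight getEqualHeight_alt
  rw [bSums_eq_convert, bSums_eq_convert, bSums_eq_convert]
  simp only [List.length_cons, List.length_map, Nat.add_sub_cancel]
  have h := loop_eq ((convertToStack h1 ((PySem.List.pyGet? n 0).getD 0)).length
      + (convertToStack h2 ((PySem.List.pyGet? n 1).getD 0)).length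
      + (convertToStack h3 ((PySem.List.pyGet? n 2).getD 0)).length + 1)
    (convertToStack h1 ((PySem.List.pyGet? n 0).getD 0))
    (convertToStack h2 ((PySem.List.pyGet? n 1).getD 0))
    (convertToStack h3 ((PySem.List.pyGet? n 2).getD 0))
    _ _ _ le_rfl le_rfl le_rfl
  simpa [List.take_length] using h
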